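-- pv_equiv track=rewrite | github.com/kovas1226/entropic.api | app/api.py | resolve_intent_from_text
-- ===== SOURCE A (Python) =====
-- def resolve_intent_from_text(question: str) -> str:
--     """Map a free-form question to a known intent keyword."""
--     text = question.lower()
--     if any(w in text for w in ["block", "resist", "stuck", "hindrance"]):
--         return "resistance"
--     if any(w in text for w in ["end", "finish", "close", "release"]):
--         return "closure"
--     if any(w in text for w in ["threshold", "transition", "change", "move"]):
--         return "threshold"
--     return "emergence"
-- ===== SOURCE B (Python) =====
-- KEYWORD_INTENT = {
--     "block": "resistance", "resist": "resistance", "stuck": "resistance", "hindrance": "resistance",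
--     "end": "closure", "finish": "closure", "close": "closure", "release": "closure",
--     "threshold": "threshold", "transition": "threshold", "change": "threshold", "move": "threshold",
-- }
--
--
-- def resolve_intent_from_text(question: str) -> str:
--     """Map a free-form question to a known intent keyword."""
--     text = question.lower()
--     matched = set()
--     for i in range(len(text)):
--         for w, intent in KEYWORD_INTENT.items():
--             if text.startswith(w, i):
--                 matched.add(intent)
--     for intent in ("resistance", "closure", "threshold"):
--         if intent in matched:
--             return intent
--     return "emergence"
-- ===== Notes on version B (the rewrite author's own statement) =====
-- stated objective: alternative
-- what changed: Instead of A's three staged any-substring checks with early returns, B makes a single left-to-right scan of the text, testing at each position which keyword starts there and accumulating the set of matched intents, then picks the highest-priority matched intent.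
import Mathlib
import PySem

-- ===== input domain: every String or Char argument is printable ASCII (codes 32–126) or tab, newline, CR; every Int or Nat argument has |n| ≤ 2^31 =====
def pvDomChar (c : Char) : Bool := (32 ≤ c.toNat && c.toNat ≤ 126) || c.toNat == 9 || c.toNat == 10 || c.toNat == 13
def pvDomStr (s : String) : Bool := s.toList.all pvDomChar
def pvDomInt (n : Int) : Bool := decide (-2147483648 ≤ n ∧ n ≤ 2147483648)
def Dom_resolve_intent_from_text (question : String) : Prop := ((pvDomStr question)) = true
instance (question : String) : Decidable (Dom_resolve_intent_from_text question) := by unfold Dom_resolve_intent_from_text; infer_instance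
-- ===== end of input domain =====

-- B replaces A's three staged any-substring checks by one scan of the text that
-- accumulates the set of intents whose keyword starts at some position, then a priority pick.

-- ===== PORT A =====
-- Port of A: question.lower() then an if/return chain of any-substring checks.
def resolve_intent_from_text (question : String) : String :=
  let text := PySem.Str.lower question
  if ["block", "resist", "stuck", "hindrance"].any (fun w => PySem.Str.isIn w text) then "resistance"
  else if ["end", "finish", "close", "release"].any (fun w => PySem.Str.isIn w text) then "closure"
  else if ["threshold", "transition", "change", "move"].any (fun w => PySem.Str.isIn w text) then "threshold"
  else "emergence"

-- ===== PORT B =====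
-- keyword -> intent map of Source B, as its items list (insertion order)
def pvKwIntent : List (String × String) :=
  [("block", "resistance"), ("resist", "resistance"), ("stuck", "resistance"), ("hindrance", "resistance"),
   ("end", "closure"), ("finish", "closure"), ("close", "closure"), ("release", "closure"),
   ("threshold", "threshold"), ("transition", "threshold"), ("change", "threshold"), ("move", "threshold")]

-- Python text.startswith(w, i) for 0 ≤ i : exact as w prefix-of text[i:]
-- B: one pass over positions, accumulate the set of matched intents, then pick by priority.
def resolve_intent_from_text_alt (question : String) : String :=
  let text := (PySem.Str.lower question).toList
  let matched : PySem.Set String :=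
    (List.range text.length).foldl
      (fun s i =>
        pvKwIntent.foldl
          (fun s p => if PySem.Chars.startswith (text.drop i) p.1.toList then PySem.Set.add s p.2 else s)
          s)
      PySem.Set.empty
  if PySem.Set.contains matched "resistance" then "resistance"
  else if PySem.Set.contains matched "closure" then "closure"
  else if PySem.Set.contains matched "threshold" then "threshold"
  else "emergence"

-- ===== PRECONDITION & SPEC =====
def Spec_resolve_intent_from_text (question : String) (out : String) : Prop := out = resolve_intent_from_text_alt question
instance (question : String) (out : String) : Decidable (Spec_resolve_intent_from_text question out) := by unfold Spec_resolve_intent_from_text; infer_instance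

-- ===== CLAIM (what is proved, stated in full; the proofs are below) =====
def Claim_equal_resolve_intent_from_text : Prop := ∀ (question : String), Dom_resolve_intent_from_text question → Spec_resolve_intent_from_text question (resolve_intent_from_text question)

-- ===== LEMMAS AND PROOFS =====

-- inner fold over the keyword table: membership characterisation
theorem pv_mem_inner (ps : List (String × String)) (cond : String × String → Bool) (acc : PySem.Set String) (t : String) :
    t ∈ ps.foldl (fun s p => if cond p then PySem.Set.add s p.2 else s) acc ↔
      t ∈ acc ∨ ∃ p ∈ ps, cond p = true ∧ p.2 = t := by
  induction ps generalizing acc with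
  | nil => simp
  | cons p ps ih =>
    simp only [List.foldl_cons, ih, List.mem_cons]
    by_cases h : cond p = true <;>
      simp only [h, if_true, if_false, Bool.false_eq_true, PySem.Set.mem_add] <;> aesop

-- outer fold over the positions: membership characterisation
theorem pv_mem_outer (L : List Nat) (text : List Char) (acc : PySem.Set String) (t : String) :
    t ∈ L.foldl (fun s i => pvKwIntent.foldl
        (fun s p => if PySem.Chars.startswith (text.drop i) p.1.toList then PySem.Set.add s p.2 else s) s) acc ↔
      t ∈ acc ∨ ∃ i ∈ L, ∃ p ∈ pvKwIntent, PySem.Chars.startswith (text.drop i) p.1.toList = true ∧ p.2 = t := by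
  induction L generalizing acc with
  | nil => simp
  | cons i L ih =>
    simp only [List.foldl_cons, ih, pv_mem_inner, List.mem_cons]
    aesop

-- a nonempty keyword starting at position j forces j < text length
theorem pv_exists_pos_iff (text w : List Char) (hw : w ≠ []) :
    (∃ i ∈ List.range text.length, w <+: text.drop i) ↔ PySem.Chars.isIn w text = true := by
  rw [← PySem.Chars.exists_prefix_drop_iff_isIn]
  constructor
  · rintro ⟨i, _, hp⟩; exact ⟨i, hp⟩
  · rintro ⟨j, hp⟩
    refine ⟨j, List.mem_range.mpr ?_, hp⟩
    by_contra h
    have : text.drop j = [] := List.drop_eq_nil_of_le (by omega)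
    rw [this] at hp
    exact hw (List.prefix_nil.mp hp)

-- membership of an intent in B's matched set ↔ A's corresponding any-check
theorem pv_matched_iff (text : List Char) (t : String) :
    (t ∈ (List.range text.length).foldl
      (fun s i => pvKwIntent.foldl
        (fun s p => if PySem.Chars.startswith (text.drop i) p.1.toList then PySem.Set.add s p.2 else s) s)
      PySem.Set.empty) ↔
    ∃ p ∈ pvKwIntent, p.2 = t ∧ PySem.Chars.isIn p.1.toList text = true := by
  rw [pv_mem_outer]
  simp only [PySem.Set.empty, List.not_mem_nil, false_or]
  constructor
  · rintro ⟨i, hi, p, hp, hc, ht⟩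
    refine ⟨p, hp, ht, ?_⟩
    rw [← pv_exists_pos_iff text p.1.toList]
    · exact ⟨i, hi, (PySem.Chars.startswith_iff _ _).mp hc⟩
    · revert hp; unfold pvKwIntent; intro hp
      fin_cases hp <;> decide
  · rintro ⟨p, hp, ht, hin⟩
    have hw : p.1.toList ≠ [] := by
      revert hp; unfold pvKwIntent; intro hp
      fin_cases hp <;> decide
    obtain ⟨i, hi, hpre⟩ := (pv_exists_pos_iff text p.1.toList hw).mpr hin
    exact ⟨i, hi, p, hp, (PySem.Chars.startswith_iff _ _).mpr hpre, ht⟩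

theorem pv_table_iff (text : List Char) (t : String) (ws : List String)
    (h : ∀ p, p ∈ pvKwIntent → (p.2 = t ↔ p.1 ∈ ws))
    (hws : ∀ w ∈ ws, (w, t) ∈ pvKwIntent) :
    (∃ p ∈ pvKwIntent, p.2 = t ∧ PySem.Chars.isIn p.1.toList text = true) ↔
      ws.any (fun w => PySem.Chars.isIn w.toList text) = true := by
  rw [List.any_eq_true]
  constructor
  · rintro ⟨p, hp, ht, hin⟩
    exact ⟨p.1, (h p hp).mp ht, hin⟩
  · rintro ⟨w, hw, hin⟩
    exact ⟨(w, t), hws w hw, rfl, hin⟩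

-- ===== VERDICT (by name: the statement is the Claim_ definition above) =====
theorem resolve_intent_from_text_spec : Claim_equal_resolve_intent_from_text := by
  intro q _
  unfold Spec_resolve_intent_from_text resolve_intent_from_text resolve_intent_from_text_alt
  have hr := pv_matched_iff (PySem.Str.lower q).toList "resistance"
  have hc := pv_matched_iff (PySem.Str.lower q).toList "closure"
  have ht := pv_matched_iff (PySem.Str.lower q).toList "threshold"
  rw [pv_table_iff _ _ ["block", "resist", "stuck", "hindrance"]
      (by unfold pvKwIntent; intro p hp; fin_cases hp <;> simp)
      (by decide)] at hr
  rw [pv_table_iff _ _ ["end", "finish", "close", "release"]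
      (by unfold pvKwIntent; intro p hp; fin_cases hp <;> simp)
      (by decide)] at hc
  rw [pv_table_iff _ _ ["threshold", "transition", "change", "move"]
      (by unfold pvKwIntent; intro p hp; fin_cases hp <;> simp)
      (by decide)] at ht
  simp only [PySem.Set.contains_iff] at *
  -- align Str.isIn with Chars.isIn on the lowered text
  simp only [PySem.Str.isIn_eq] at *
  split_ifs with h1 h2 h3 h4 h5 h6 <;>
    first
    | rfl
    | (exfalso; simp_all)
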